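-- pv_equiv track=rewrite | github.com/paiml/depyler | examples/hard_sequence_generation.py | stern_brocot
-- ===== SOURCE A (Python) =====
-- def stern_brocot(n: int) -> list[int]:
--     """Generate first n terms of the Stern-Brocot sequence."""
--     if n <= 0:
--         result: list[int] = []
--         return result
--     if n == 1:
--         result2: list[int] = [1]
--         return result2
--     seq: list[int] = [1, 1]
--     while len(seq) < n:
--         sz: int = len(seq)
--         idx: int = sz // 2
--         val: int = seq[idx]
--         prev_idx: int = idx - 1
--         if sz % 2 == 0:
--             seq.append(val + seq[prev_idx])
--         else:
--             seq.append(val)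
--     result3: list[int] = seq
--     return result3
-- ===== SOURCE B (Python) =====
-- def stern_brocot(n: int) -> list[int]:
--     """Generate first n terms of the Stern-Brocot sequence.
--
--     Each term is derived independently from its index via the fusc
--     (Stern diatomic) bit recurrence: seq[i] == fusc(i+1)."""
--     out: list[int] = []
--     for k in range(1, n + 1):
--         a, b = 1, 0
--         while k > 0:
--             if k % 2 == 1:
--                 b = a + b
--             else:
--                 a = a + b
--             k //= 2
--         out.append(b)
--     return out
-- ===== Notes on version B (the rewrite author's own statement) =====
-- stated objective: alternative
-- what changed: Each term is computed independently from its index by the fusc (Stern diatomic) LSB-first bit recurrence instead of incrementally extending a shared sequence array by reading back its middle elements.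
import Mathlib
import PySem

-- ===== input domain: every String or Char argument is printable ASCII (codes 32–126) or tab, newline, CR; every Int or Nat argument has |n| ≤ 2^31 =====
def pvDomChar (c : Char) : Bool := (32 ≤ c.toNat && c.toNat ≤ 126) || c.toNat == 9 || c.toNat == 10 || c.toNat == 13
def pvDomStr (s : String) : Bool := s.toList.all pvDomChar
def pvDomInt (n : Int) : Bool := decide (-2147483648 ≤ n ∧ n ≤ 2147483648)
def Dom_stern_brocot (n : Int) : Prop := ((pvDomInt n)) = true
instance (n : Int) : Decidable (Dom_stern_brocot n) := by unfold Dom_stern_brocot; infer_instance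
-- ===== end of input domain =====

-- ===== PORT A =====
-- B derives each term independently from its index via the fusc bit recurrence;
-- A extends a shared array incrementally. Proved equal for all n.

-- while len(seq) < n: append middle-derived value
-- (fuel only makes the loop total; n.toNat fuel always suffices since each pass appends one element)
def sternLoop (fuel : Nat) (n : Int) (seq : List Int) : List Int :=
  match fuel with
  | 0 => seq
  | fuel + 1 =>
    if (seq.length : Int) < n then
      let sz : Int := seq.length
      let idx : Int := PySem.Int.floordiv sz 2
      match PySem.List.pyGet? seq idx with
      | none => seq  -- IndexError (unreachable: 0 ≤ idx < len)
      | some val =>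
        if PySem.Int.mod sz 2 == 0 then
          match PySem.List.pyGet? seq (idx - 1) with
          | none => seq  -- IndexError (unreachable)
          | some pv => sternLoop fuel n (seq ++ [val + pv])
        else sternLoop fuel n (seq ++ [val])
    else seq

def stern_brocot (n : Int) : List Int :=
  if n ≤ 0 then []
  else if n == 1 then [1]
  else sternLoop n.toNat n [1, 1]

-- ===== PORT B =====
-- a, b = 1, 0; while k > 0: if k % 2 == 1: b = a+b else: a = a+b; k //= 2
-- (fuel only makes the loop total; k.toNat fuel always suffices since k at least halves each pass)
def fuscLoop (fuel : Nat) (k a b : Int) : Int :=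
  match fuel with
  | 0 => b
  | fuel + 1 =>
    if k > 0 then
      if PySem.Int.mod k 2 == 1 then fuscLoop fuel (PySem.Int.floordiv k 2) a (a + b)
      else fuscLoop fuel (PySem.Int.floordiv k 2) (a + b) b
    else b

def stern_brocot_alt (n : Int) : List Int :=
  (PySem.List.pyRange 1 (n + 1) 1).foldl (fun out k => out ++ [fuscLoop k.toNat k 1 0]) []

-- ===== PRECONDITION & SPEC =====
def Spec_stern_brocot (n : Int) (out : List Int) : Prop := out = stern_brocot_alt n
instance (n : Int) (out : List Int) : Decidable (Spec_stern_brocot n out) := by unfold Spec_stern_brocot; infer_instance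

-- ===== CLAIM (what is proved, stated in full; the proofs are below) =====
def Claim_equal_stern_brocot : Prop := ∀ (n : Int), Dom_stern_brocot n → Spec_stern_brocot n (stern_brocot n)

-- ===== LEMMAS AND PROOFS =====

-- the Stern diatomic (fusc) function
def fusc : Nat → Int
  | 0 => 0
  | 1 => 1
  | k + 2 =>
    if (k + 2) % 2 = 0 then fusc ((k + 2) / 2)
    else fusc ((k + 2) / 2) + fusc ((k + 2) / 2 + 1)
decreasing_by all_goals omega

theorem fusc_one : fusc 1 = 1 := by rw [fusc]

theorem fusc_two : fusc 2 = 1 := by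
  rw [show (2 : Nat) = 0 + 2 from rfl, fusc]
  norm_num [fusc_one]

theorem fusc_even (m : Nat) : fusc (2 * m) = fusc m := by
  match m with
  | 0 => rfl
  | 1 => rw [show 2 * 1 = 2 from rfl, fusc_two, fusc_one]
  | m + 2 =>
    rw [show 2 * (m + 2) = (2 * m + 2) + 2 by ring, fusc, if_pos (by omega)]
    congr 1
    omega

theorem fusc_odd (m : Nat) : fusc (2 * m + 1) = fusc m + fusc (m + 1) := by
  match m with
  | 0 => simp [fusc]
  | m + 1 =>
    rw [show 2 * (m + 1) + 1 = (2 * m + 1) + 2 by ring, fusc, if_neg (by omega)]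
    rw [show (2 * m + 1 + 2) / 2 = m + 1 by omega]

-- the bit loop computes a * fusc k + b * fusc (k+1), given enough fuel
theorem fuscLoop_eq (fuel k : Nat) (hf : k ≤ fuel) (a b : Int) :
    fuscLoop fuel (k : Int) a b = a * fusc k + b * fusc (k + 1) := by
  induction fuel generalizing k a b with
  | zero =>
    have : k = 0 := by omega
    subst this
    simp [fuscLoop, fusc]
  | succ fuel ih =>
    match k with
    | 0 => simp [fuscLoop, fusc]
    | k + 1 =>
      rw [fuscLoop]
      have hpos : ((k + 1 : Nat) : Int) > 0 := by positivity
      have hmod : PySem.Int.mod ((k + 1 : Nat) : Int) 2 = (((k + 1) % 2 : Nat) : Int) := by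
        exact_mod_cast PySem.Int.mod_natCast (k + 1) 2
      have hdiv : PySem.Int.floordiv ((k + 1 : Nat) : Int) 2 = (((k + 1) / 2 : Nat) : Int) := by
        exact_mod_cast PySem.Int.floordiv_natCast (k + 1) 2
      simp only [hpos, hmod, hdiv, if_true]
      rcases Nat.even_or_odd (k + 1) with he | ho
      · obtain ⟨m, hm⟩ := he
        have hk1 : k + 1 = 2 * m := by omega
        have hm2 : (k + 1) % 2 = 0 := by omega
        have hd : (k + 1) / 2 = m := by omega
        rw [hm2, hd]
        have hmlt : m ≤ fuel := by omega
        rw [show ((((0 : Nat)) : Int) == 1) = false by simp]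
        simp only [Bool.false_eq_true, if_false]
        rw [ih m hmlt, hk1, fusc_even, fusc_odd]
        ring
      · obtain ⟨m, hm⟩ := ho
        have hm2 : (k + 1) % 2 = 1 := by omega
        have hd : (k + 1) / 2 = m := by omega
        rw [hm2, hd]
        have hmlt : m ≤ fuel := by omega
        simp only [show (((1 : Nat) : Int) == 1) = true by decide, if_true]
        rw [ih m hmlt]
        rw [hm, fusc_odd, show 2 * m + 1 + 1 = 2 * (m + 1) by ring, fusc_even]
        ring

-- the first m terms of the sequence
def S (m : Nat) : List Int := (List.range m).map (fun i => fusc (i + 1))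

theorem S_length (m : Nat) : (S m).length = m := by simp [S]

theorem S_get (m i : Nat) (h : i < m) : (S m)[i]'(by simp [S]; omega) = fusc (i + 1) := by
  simp [S]

theorem S_append (m : Nat) : S (m + 1) = S m ++ [fusc (m + 1)] := by
  simp [S, List.range_succ]

-- one loop step appends exactly fusc (m+1)
theorem sternLoop_S (fuel : Nat) (n : Int) (m : Nat) (hm : 2 ≤ m) (hlt : (m : Int) < n) :
    sternLoop (fuel + 1) n (S m) = sternLoop fuel n (S (m + 1)) := by
  rw [sternLoop]
  have hlen : ((S m).length : Int) = (m : Int) := by simp [S_length]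
  simp only [hlen, hlt, if_true]
  have hidx : PySem.Int.floordiv (m : Int) 2 = ((m / 2 : Nat) : Int) := by
    exact_mod_cast PySem.Int.floordiv_natCast m 2
  have hmod : PySem.Int.mod (m : Int) 2 = ((m % 2 : Nat) : Int) := by
    exact_mod_cast PySem.Int.mod_natCast m 2
  have hlt2 : m / 2 < m := by omega
  have hget : PySem.List.pyGet? (S m) ((m / 2 : Nat) : Int) = some (fusc (m / 2 + 1)) := by
    rw [PySem.List.pyGet?_natCast]
    rw [List.getElem?_eq_getElem (by simp [S_length]; omega)]
    rw [S_get m (m / 2) hlt2]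
  simp only [hidx, hget]
  rcases Nat.even_or_odd m with ⟨t, ht⟩ | ⟨t, ht⟩
  · have hm2 : m % 2 = 0 := by omega
    have heq : (PySem.Int.mod (m : Int) 2 == 0) = true := by rw [hmod, hm2]; decide
    simp only [heq, reduceIte]
    have hcast : ((m / 2 : Nat) : Int) - 1 = ((m / 2 - 1 : Nat) : Int) := by omega
    have hget2 : PySem.List.pyGet? (S m) (((m / 2 : Nat) : Int) - 1) =
        some (fusc (m / 2 - 1 + 1)) := by
      rw [hcast, PySem.List.pyGet?_natCast]
      rw [List.getElem?_eq_getElem (by simp [S_length]; omega)]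
      rw [S_get m (m / 2 - 1) (by omega)]
    simp only [hget2]
    have hv : fusc (m / 2 + 1) + fusc (m / 2 - 1 + 1) = fusc (m + 1) := by
      have : m + 1 = 2 * (m / 2) + 1 := by omega
      rw [this, fusc_odd, show m / 2 - 1 + 1 = m / 2 by omega]; ring
    rw [show S m ++ [fusc (m / 2 + 1) + fusc (m / 2 - 1 + 1)] = S (m + 1) by
      rw [S_append, hv]]
  · have hm2 : m % 2 = 1 := by omega
    have heq : (PySem.Int.mod (m : Int) 2 == 0) = false := by rw [hmod, hm2]; decide
    simp only [heq, Bool.false_eq_true, reduceIte]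
    have hv : fusc (m / 2 + 1) = fusc (m + 1) := by
      have : m + 1 = 2 * (m / 2 + 1) := by omega
      rw [this, fusc_even]
    rw [show S m ++ [fusc (m / 2 + 1)] = S (m + 1) by rw [S_append, hv]]

theorem sternLoop_done (fuel : Nat) (n : Int) (m : Nat) (h : ¬ ((m : Int) < n)) :
    sternLoop fuel n (S m) = S m := by
  match fuel with
  | 0 => rw [sternLoop]
  | fuel + 1 =>
    rw [sternLoop]
    have hlen : ((S m).length : Int) = (m : Int) := by simp [S_length]
    simp only [hlen, h, if_neg, not_false_iff]

theorem sternLoop_eval (fuel : Nat) (n : Int) (m : Nat) (hm : 2 ≤ m)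
    (hf : n.toNat ≤ m + fuel) :
    sternLoop fuel n (S m) = S (max m n.toNat) := by
  induction fuel generalizing m with
  | zero =>
    have h : ¬ ((m : Int) < n) := by omega
    rw [sternLoop_done 0 n m h]
    congr 1
    omega
  | succ fuel ih =>
    by_cases h : (m : Int) < n
    · rw [sternLoop_S fuel n m hm h]
      rw [ih (m + 1) (by omega) (by omega)]
      congr 1
      omega
    · rw [sternLoop_done (fuel + 1) n m h]
      congr 1
      omega

theorem alt_eq_S (n : Int) : stern_brocot_alt n = S n.toNat := by
  unfold stern_brocot_alt
  rw [PySem.List.foldl_append_singleton_eq_map]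
  rw [PySem.List.pyRange_one]
  have : (n + 1 - 1).toNat = n.toNat := by omega
  rw [this]
  simp only [List.map_map, S]
  apply List.map_congr_left
  intro i _
  simp only [Function.comp_apply]
  rw [show (1 : Int) + (i : Int) = ((i + 1 : Nat) : Int) by push_cast; ring]
  rw [show ((i + 1 : Nat) : Int).toNat = i + 1 by omega]
  rw [fuscLoop_eq (i + 1) (i + 1) le_rfl 1 0]
  ring

-- ===== VERDICT (by name: the statement is the Claim_ definition above) =====
theorem stern_brocot_spec : Claim_equal_stern_brocot := by
  intro n _
  unfold Spec_stern_brocot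
  rw [alt_eq_S]
  unfold stern_brocot
  by_cases h0 : n ≤ 0
  · simp only [h0, if_true]
    have : n.toNat = 0 := by omega
    rw [this]; rfl
  · simp only [h0, if_false]
    by_cases h1 : n = 1
    · simp only [h1]
      rw [show (1 : Int).toNat = 1 from rfl]
      norm_num [stern_brocot, S, List.range_one, fusc_one]
    · have hne : (n == 1) = false := by simp [h1]
      rw [hne]; simp only [Bool.false_eq_true, if_false]
      have h2 : (2 : Int) ≤ n := by omega
      have hS2 : ([1, 1] : List Int) = S 2 := by
        simp [S, List.range_succ, fusc_one, fusc_two]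
      rw [hS2, sternLoop_eval n.toNat n 2 (by omega) (by omega)]
      congr 1
      omega
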